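-- pv_equiv track=rewrite | github.com/TulioAbreu/uri-online-judge | 1848.py | winks2int
-- ===== SOURCE A (Python) =====
-- def winks2int(winks_sequence):
--     binary_sequence = '0'
--     for wink in winks_sequence:
--         if wink == '-':
--             binary_sequence += '0'
--         else:
--             binary_sequence += '1'
--     return int(binary_sequence, 2)
-- ===== SOURCE B (Python) =====
-- def winks2int(winks_sequence):
--     result = 0
--     for wink in winks_sequence:
--         result = result * 2 + (0 if wink == '-' else 1)
--     return result
-- ===== Notes on version B (the rewrite author's own statement) =====
-- stated objective: simpler
-- what changed: B replaces A's build-a-binary-string-then-int(s,2) pipeline with a single arithmetic Horner accumulation (result = result*2 + bit), doing no string construction or parsing.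
import Mathlib
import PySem

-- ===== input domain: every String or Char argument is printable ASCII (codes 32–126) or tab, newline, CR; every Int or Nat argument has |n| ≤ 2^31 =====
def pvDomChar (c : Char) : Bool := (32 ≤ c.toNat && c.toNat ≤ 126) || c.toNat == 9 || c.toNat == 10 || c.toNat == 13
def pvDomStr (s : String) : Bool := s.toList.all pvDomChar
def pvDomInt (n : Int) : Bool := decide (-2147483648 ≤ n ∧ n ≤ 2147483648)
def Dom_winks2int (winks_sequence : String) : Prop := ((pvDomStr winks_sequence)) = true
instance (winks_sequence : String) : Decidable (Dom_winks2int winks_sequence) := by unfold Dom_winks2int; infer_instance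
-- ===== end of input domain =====

-- B replaces A's build-a-binary-string-then-parse pipeline with a single arithmetic
-- Horner accumulation (simpler: no string construction, no base-2 parse).


-- ===== PORT A =====
-- Hand port of Python's int(s, 2), exact on the strings A builds: here s is always a
-- nonempty string of '0'/'1' digits (leading '0' then one digit per wink), so none of
-- int()'s whitespace/sign/'0b'-prefix/underscore cases can arise and int(s, 2) is plain
-- left-to-right base-2 digit evaluation with digit value ord(c) - 48.
def pvIntBase2 (cs : List Char) : Int :=
  cs.foldl (fun acc c => acc * 2 + ((c.toNat : Int) - 48)) 0

def winks2int (winks_sequence : String) : Int :=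
  let binary_sequence :=
    winks_sequence.toList.foldl
      (fun bs wink => if wink = '-' then bs ++ ['0'] else bs ++ ['1']) ['0']
  pvIntBase2 binary_sequence

-- ===== PORT B =====
def winks2int_alt (winks_sequence : String) : Int :=
  winks_sequence.toList.foldl (fun result wink => result * 2 + (if wink = '-' then 0 else 1)) 0

-- ===== PRECONDITION & SPEC =====
def Spec_winks2int (winks_sequence : String) (out : Int) : Prop := out = winks2int_alt winks_sequence
instance (winks_sequence : String) (out : Int) : Decidable (Spec_winks2int winks_sequence out) := by unfold Spec_winks2int; infer_instance

-- ===== CLAIM (what is proved, stated in full; the proofs are below) =====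
def Claim_equal_winks2int : Prop := ∀ (winks_sequence : String), Dom_winks2int winks_sequence → Spec_winks2int winks_sequence (winks2int winks_sequence)

-- ===== LEMMAS AND PROOFS =====

-- A's loop builds init ++ one digit char per wink.
theorem pv_build_eq_map (l : List Char) (init : List Char) :
    l.foldl (fun bs wink => if wink = '-' then bs ++ ['0'] else bs ++ ['1']) init
      = init ++ l.map (fun wink => if wink = '-' then '0' else '1') := by
  induction l generalizing init with
  | nil => simp
  | cons w l ih =>
    by_cases hw : w = '-' <;> simp [hw, ih, List.append_assoc]

-- evaluating the digit list A builds equals B's Horner fold started from the same accumulator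
theorem pv_horner_eq (l : List Char) (acc : Int) :
    (l.map (fun wink => if wink = '-' then '0' else '1')).foldl
        (fun a c => a * 2 + ((c.toNat : Int) - 48)) acc
      = l.foldl (fun result wink => result * 2 + (if wink = '-' then 0 else 1)) acc := by
  induction l generalizing acc with
  | nil => rfl
  | cons w l ih =>
    by_cases hw : w = '-' <;> simp [hw, ih]

-- ===== VERDICT (by name: the statement is the Claim_ definition above) =====
theorem winks2int_spec : Claim_equal_winks2int := by
  intro s _
  unfold Spec_winks2int winks2int winks2int_alt pvIntBase2
  rw [pv_build_eq_map]
  simp only [List.cons_append, List.nil_append, List.foldl_cons]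
  rw [pv_horner_eq]
  have h0 : ((('0' : Char).toNat : Int) - 48) = 0 := by decide
  rw [h0]
  norm_num
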